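-- pv_equiv track=rewrite | github.com/sgtkellox/CancerClassifier | TumorClassifier/split_dataset/split_tiles_by_label.py | sortByDiag
-- ===== SOURCE A (Python) =====
-- def sortByDiag(wsis):
--     mb = []
--     lym = []
--     met = []
--     mel = []
--     men = []
--     schw = []
--     pit = []
--
--     result = []
--
--     for slide in wsis:
--         if slide.startswith("MB"):
--             mb.append(slide)
--         elif slide.startswith("LYM"):
--             lym.append(slide)
--         elif slide.startswith("MET"):
--             met.append(slide)
--         elif slide.startswith("MEL"):
--             mel.append(slide)
--         elif slide.startswith("MEN"):
--             men.append(slide)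
--         elif slide.startswith("SCHW"):
--             schw.append(slide)
--         elif slide.startswith("PIT"):
--             pit.append(slide)
--
--     result.append(mb)
--     result.append(lym)
--     result.append(met)
--     result.append(mel)
--     result.append(men)
--     result.append(schw)
--     result.append(pit)
--
--     return result
-- ===== SOURCE B (Python) =====
-- def sortByDiag(wsis):
--     # One independent filter pass per diagnosis prefix. Correct because no prefix in
--     # the table is a prefix of another, so the seven startswith tests are mutually
--     # exclusive and first-match order does not matter.
--     return [[s for s in wsis if s.startswith(p)]
--             for p in ("MB", "LYM", "MET", "MEL", "MEN", "SCHW", "PIT")]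
-- ===== Notes on version B (the rewrite author's own statement) =====
-- stated objective: simpler
-- what changed: Replaces the single stateful pass with seven accumulator lists and a seven-branch elif chain by seven independent stateless filter passes, one per prefix; this is correct because the seven prefixes are pairwise non-prefix of each other, so the startswith tests are mutually exclusive.
import Mathlib
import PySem

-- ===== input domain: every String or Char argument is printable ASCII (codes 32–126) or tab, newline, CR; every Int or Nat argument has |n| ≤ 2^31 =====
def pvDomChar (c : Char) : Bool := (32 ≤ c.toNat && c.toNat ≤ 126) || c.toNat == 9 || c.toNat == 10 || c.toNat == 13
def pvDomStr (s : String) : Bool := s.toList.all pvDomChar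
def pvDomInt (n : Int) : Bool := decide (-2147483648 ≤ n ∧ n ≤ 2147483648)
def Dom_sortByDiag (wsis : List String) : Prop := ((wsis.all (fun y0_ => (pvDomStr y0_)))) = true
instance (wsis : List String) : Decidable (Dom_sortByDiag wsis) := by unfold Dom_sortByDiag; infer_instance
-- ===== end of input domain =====

-- B replaces A's single stateful pass (seven accumulator lists, seven-branch elif chain)
-- by seven independent stateless filter passes, one per prefix; correct because the
-- prefixes are pairwise non-prefix of each other, so the tests are mutually exclusive.


-- ===== PORT A =====
-- state: (mb, lym, met, mel, men, schw, pit)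
def pvStepA (s : List String × List String × List String × List String × List String × List String × List String)
    (slide : String) :
    List String × List String × List String × List String × List String × List String × List String :=
  let (mb, lym, met, mel, men, schw, pit) := s
  if PySem.Str.startswith slide "MB" then (mb ++ [slide], lym, met, mel, men, schw, pit)
  else if PySem.Str.startswith slide "LYM" then (mb, lym ++ [slide], met, mel, men, schw, pit)
  else if PySem.Str.startswith slide "MET" then (mb, lym, met ++ [slide], mel, men, schw, pit)
  else if PySem.Str.startswith slide "MEL" then (mb, lym, met, mel ++ [slide], men, schw, pit)
  else if PySem.Str.startswith slide "MEN" then (mb, lym, met, mel, men ++ [slide], schw, pit)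
  else if PySem.Str.startswith slide "SCHW" then (mb, lym, met, mel, men, schw ++ [slide], pit)
  else if PySem.Str.startswith slide "PIT" then (mb, lym, met, mel, men, schw, pit ++ [slide])
  else (mb, lym, met, mel, men, schw, pit)

def sortByDiag (wsis : List String) : List (List String) :=
  let st := wsis.foldl pvStepA ([], [], [], [], [], [], [])
  let (mb, lym, met, mel, men, schw, pit) := st
  [mb, lym, met, mel, men, schw, pit]

-- ===== PORT B =====
def sortByDiag_alt (wsis : List String) : List (List String) :=
  (["MB", "LYM", "MET", "MEL", "MEN", "SCHW", "PIT"] : List String).map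
    (fun p => wsis.filter (fun s => PySem.Str.startswith s p))

-- ===== PRECONDITION & SPEC =====
def Spec_sortByDiag (wsis : List String) (out : List (List String)) : Prop := out = sortByDiag_alt wsis
instance (wsis : List String) (out : List (List String)) : Decidable (Spec_sortByDiag wsis out) := by unfold Spec_sortByDiag; infer_instance

-- ===== CLAIM (what is proved, stated in full; the proofs are below) =====
def Claim_equal_sortByDiag : Prop := ∀ (wsis : List String), Dom_sortByDiag wsis → Spec_sortByDiag wsis (sortByDiag wsis)

-- ===== LEMMAS AND PROOFS =====

-- one of B's filter passes
def pvFilt (p : String) (xs : List String) : List String :=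
  xs.filter (fun s => PySem.Str.startswith s p)

-- two prefixes of which neither prefixes the other cannot both start a string
lemma pv_excl (s p q : String) (h : ¬ p.toList <+: q.toList ∧ ¬ q.toList <+: p.toList)
    (hp : PySem.Str.startswith s p = true) : PySem.Str.startswith s q = false := by
  cases hq : PySem.Str.startswith s q
  · rfl
  · exfalso
    rw [PySem.Str.startswith_eq, PySem.Chars.startswith_iff] at hp hq
    rcases List.prefix_or_prefix_of_prefix hp hq with h' | h'
    · exact h.1 h'
    · exact h.2 h'

-- A's loop with accumulators (a,…,g) computes the accumulators followed by B's filters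
lemma pv_loop_eq (xs : List String) : ∀ a b c d e f g : List String,
    xs.foldl pvStepA (a, b, c, d, e, f, g) =
      (a ++ pvFilt "MB" xs, b ++ pvFilt "LYM" xs, c ++ pvFilt "MET" xs,
       d ++ pvFilt "MEL" xs, e ++ pvFilt "MEN" xs, f ++ pvFilt "SCHW" xs,
       g ++ pvFilt "PIT" xs) := by
  induction xs with
  | nil => intro a b c d e f g; simp [pvFilt]
  | cons x xs ih =>
    intro a b c d e f g
    simp only [List.foldl_cons, pvStepA]
    split_ifs with h1 h2 h3 h4 h5 h6 h7
    · have e2 := pv_excl x "MB" "LYM" (by decide) h1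
      have e3 := pv_excl x "MB" "MET" (by decide) h1
      have e4 := pv_excl x "MB" "MEL" (by decide) h1
      have e5 := pv_excl x "MB" "MEN" (by decide) h1
      have e6 := pv_excl x "MB" "SCHW" (by decide) h1
      have e7 := pv_excl x "MB" "PIT" (by decide) h1
      rw [ih]; simp_all [pvFilt]
    · have e3 := pv_excl x "LYM" "MET" (by decide) h2
      have e4 := pv_excl x "LYM" "MEL" (by decide) h2
      have e5 := pv_excl x "LYM" "MEN" (by decide) h2
      have e6 := pv_excl x "LYM" "SCHW" (by decide) h2
      have e7 := pv_excl x "LYM" "PIT" (by decide) h2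
      rw [ih]; simp_all [pvFilt]
    · have e4 := pv_excl x "MET" "MEL" (by decide) h3
      have e5 := pv_excl x "MET" "MEN" (by decide) h3
      have e6 := pv_excl x "MET" "SCHW" (by decide) h3
      have e7 := pv_excl x "MET" "PIT" (by decide) h3
      rw [ih]; simp_all [pvFilt]
    · have e5 := pv_excl x "MEL" "MEN" (by decide) h4
      have e6 := pv_excl x "MEL" "SCHW" (by decide) h4
      have e7 := pv_excl x "MEL" "PIT" (by decide) h4
      rw [ih]; simp_all [pvFilt]
    · have e6 := pv_excl x "MEN" "SCHW" (by decide) h5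
      have e7 := pv_excl x "MEN" "PIT" (by decide) h5
      rw [ih]; simp_all [pvFilt]
    · have e7 := pv_excl x "SCHW" "PIT" (by decide) h6
      rw [ih]; simp_all [pvFilt]
    · rw [ih]; simp_all [pvFilt]
    · rw [ih]; simp_all [pvFilt]

-- ===== VERDICT (by name: the statement is the Claim_ definition above) =====
theorem sortByDiag_spec : Claim_equal_sortByDiag := by
  intro wsis _
  unfold Spec_sortByDiag sortByDiag sortByDiag_alt
  rw [pv_loop_eq]
  simp [pvFilt]
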